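-- pv_equiv track=rewrite | github.com/HowardHsuuu/texas-holdem-agents | my_agents/mcts_player.py | _board_has_straight_potential
-- ===== SOURCE A (Python) =====
-- def _board_has_straight_potential(ranks):
--     try:
--         unique_ranks = sorted(set(ranks))
--         if len(unique_ranks) < 3:
--             return False
--
--         consecutive = 1
--         max_consecutive = 1
--
--         for i in range(1, len(unique_ranks)):
--             if unique_ranks[i] - unique_ranks[i-1] == 1:
--                 consecutive += 1
--                 max_consecutive = max(max_consecutive, consecutive)
--             else:
--                 consecutive = 1
--
--         return max_consecutive >= 3
--     except:
--         return False
-- ===== SOURCE B (Python) =====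
-- def _board_has_straight_potential(ranks):
--     try:
--         s = set(ranks)
--         return any((r + 1) in s and (r + 2) in s for r in s)
--     except:
--         return False
-- ===== Notes on version B (the rewrite author's own statement) =====
-- stated objective: simpler
-- what changed: Replaces sorted(set(ranks)) plus a linear adjacent-difference run-length scan with a direct set-membership test: true iff some r in set(ranks) has r+1 and r+2 also in the set; no sorting, no run counters.
import Mathlib
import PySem

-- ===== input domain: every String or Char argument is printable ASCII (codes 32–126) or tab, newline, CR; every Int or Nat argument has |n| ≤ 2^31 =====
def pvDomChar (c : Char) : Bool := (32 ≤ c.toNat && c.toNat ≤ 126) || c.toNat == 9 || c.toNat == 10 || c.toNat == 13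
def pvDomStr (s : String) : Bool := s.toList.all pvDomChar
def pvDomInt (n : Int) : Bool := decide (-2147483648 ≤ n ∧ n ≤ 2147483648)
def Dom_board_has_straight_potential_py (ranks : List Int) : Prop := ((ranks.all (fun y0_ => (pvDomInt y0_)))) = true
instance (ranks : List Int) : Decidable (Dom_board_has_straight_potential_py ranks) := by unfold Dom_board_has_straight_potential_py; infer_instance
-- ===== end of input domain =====

-- B replaces sort + adjacent-difference run scan by a set-membership test for a 3-window (simpler).

-- ===== PORT A =====
-- literal port of A: unique_ranks = sorted(set(ranks)); run-length scan over range(1, len).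
-- pyGetD with default 0 is exact here: every index taken in the loop is in range.
def board_has_straight_potential_py (ranks : List Int) : Bool :=
  let unique_ranks := PySem.List.sorted (PySem.Set.ofList ranks) (fun x => x) false
  if unique_ranks.length < 3 then false
  else
    let st := (PySem.List.pyRange 1 (unique_ranks.length : Int) 1).foldl
      (fun (p : Int × Int) i =>
        if PySem.List.pyGetD unique_ranks i 0 - PySem.List.pyGetD unique_ranks (i - 1) 0 = 1 then
          (p.1 + 1, max p.2 (p.1 + 1))
        else (1, p.2)) (1, 1)
    decide (st.2 ≥ 3)

-- ===== PORT B =====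
-- literal port of B: s = set(ranks); any((r+1) in s and (r+2) in s for r in s)
def board_has_straight_potential_py_alt (ranks : List Int) : Bool :=
  let s := PySem.Set.ofList ranks
  s.any (fun r => PySem.Set.contains s (r + 1) && PySem.Set.contains s (r + 2))

-- ===== PRECONDITION & SPEC =====
def Spec_board_has_straight_potential_py (ranks : List Int) (out : Bool) : Prop := out = board_has_straight_potential_py_alt ranks
instance (ranks : List Int) (out : Bool) : Decidable (Spec_board_has_straight_potential_py ranks out) := by unfold Spec_board_has_straight_potential_py; infer_instance

-- ===== CLAIM (what is proved, stated in full; the proofs are below) =====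
def Claim_equal_board_has_straight_potential_py : Prop := ∀ (ranks : List Int), Dom_board_has_straight_potential_py ranks → Spec_board_has_straight_potential_py ranks (board_has_straight_potential_py ranks)

-- ===== LEMMAS AND PROOFS =====

-- structural version of A's loop state (consecutive, max_consecutive)
def pvScan (prev : Int) (st : Int × Int) : List Int → Int × Int
  | [] => st
  | x :: w =>
      if x - prev = 1 then pvScan x (st.1 + 1, max st.2 (st.1 + 1)) w
      else pvScan x (1, st.2) w

-- "some three adjacent elements are consecutive"
def pvTrip3 : List Int → Bool
  | a :: b :: c :: t => (decide (b = a + 1) && decide (c = b + 1)) || pvTrip3 (b :: c :: t)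
  | _ => false

def pvHeadIs (v : List Int) (y : Int) : Prop :=
  match v with
  | [] => False
  | x :: _ => x = y

-- bridge: A's pyRange/pyGetD fold is the structural scan
theorem pv_bridge (u : List Int) : ∀ (k : Nat) (st : Int × Int), 1 ≤ k →
    (PySem.List.pyRange (k : Int) (u.length : Int) 1).foldl
      (fun (p : Int × Int) i =>
        if PySem.List.pyGetD u i 0 - PySem.List.pyGetD u (i - 1) 0 = 1 then
          (p.1 + 1, max p.2 (p.1 + 1))
        else (1, p.2)) st
    = pvScan (u.getD (k - 1) 0) st (u.drop k) := by
  intro k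
  induction hn : u.length - k using Nat.strong_induction_on generalizing k with
  | _ n ih =>
    intro st hk
    by_cases hlt : k < u.length
    · rw [PySem.List.pyRange_one_cons (by exact_mod_cast hlt)]
      rw [List.foldl_cons]
      have hdrop : u.drop k = u[k] :: u.drop (k + 1) := List.drop_eq_getElem_cons hlt
      have hget : PySem.List.pyGetD u (k : Int) 0 = u.getD k 0 := PySem.List.pyGetD_natCast u k 0
      have hcast : (k : Int) - 1 = ((k - 1 : Nat) : Int) := by omega
      have hget' : PySem.List.pyGetD u ((k : Int) - 1) 0 = u.getD (k - 1) 0 := by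
        rw [hcast]; exact PySem.List.pyGetD_natCast u (k - 1) 0
      have hgetE : u.getD k 0 = u[k] := List.getD_eq_getElem u 0 hlt
      have hrec := ih (u.length - (k + 1)) (by omega) (k + 1) (by omega)
        (if u.getD k 0 - u.getD (k - 1) 0 = 1 then (st.1 + 1, max st.2 (st.1 + 1)) else (1, st.2))
        (by omega)
      have hsucc : ((k : Int) + 1) = ((k + 1 : Nat) : Int) := by omega
      rw [hget, hget', hsucc] at *
      rw [hdrop]
      simp only [pvScan, Nat.add_sub_cancel] at *
      rw [hgetE] at *
      split
      next h => rw [if_pos h] at hrec; exact hrec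
      next h => rw [if_neg h] at hrec; exact hrec
    · rw [PySem.List.pyRange_one_eq_nil (by exact_mod_cast (by omega : u.length ≤ k))]
      rw [List.drop_eq_nil_of_le (by omega)]
      rfl

-- the scan's max-run ≥ 3 characterised by pvTrip3 (plus carried state)
theorem pv_scan_spec : ∀ (v : List Int) (prev : Int) (c m : Int), 1 ≤ c →
    ((pvScan prev (c, m) v).2 ≥ 3 ↔ m ≥ 3 ∨ pvTrip3 (prev :: v) = true ∨ (2 ≤ c ∧ pvHeadIs v (prev + 1))) := by
  intro v
  induction v with
  | nil => intro prev c m hc; simp [pvScan, pvTrip3, pvHeadIs]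
  | cons x w ih =>
    intro prev c m hc
    by_cases hx : x - prev = 1
    · have hx' : x = prev + 1 := by omega
      simp only [pvScan, if_pos hx]
      rw [ih x (c + 1) (max m (c + 1)) (by omega)]
      have htrip : (pvTrip3 (prev :: x :: w) = true) ↔ ((pvHeadIs w (x + 1)) ∨ pvTrip3 (x :: w) = true) := by
        cases w with
        | nil => simp [pvTrip3, pvHeadIs]
        | cons y t => simp [pvTrip3, pvHeadIs, hx']
      rw [htrip]
      constructor
      · rintro (h | h | h)
        · rcases (by omega : m ≥ 3 ∨ c + 1 ≥ 3) with h1 | h1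
          · exact Or.inl h1
          · exact Or.inr (Or.inr ⟨by omega, by simp [pvHeadIs, hx']⟩)
        · exact Or.inr (Or.inl (Or.inr h))
        · exact Or.inr (Or.inl (Or.inl h.2))
      · rintro (h | (h | h) | h)
        · exact Or.inl (by omega)
        · exact Or.inr (Or.inr ⟨by omega, h⟩)
        · exact Or.inr (Or.inl h)
        · exact Or.inl (by omega)
    · simp only [pvScan, if_neg hx]
      rw [ih x 1 m (by omega)]
      have htrip : (pvTrip3 (prev :: x :: w) = true) ↔ (pvTrip3 (x :: w) = true) := by
        cases w with
        | nil => simp [pvTrip3]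
        | cons y t => simp [pvTrip3]; intro h1; omega
      rw [htrip]
      constructor
      · rintro (h | h | h)
        · exact Or.inl h
        · exact Or.inr (Or.inl h)
        · omega
      · rintro (h | h | h)
        · exact Or.inl h
        · exact Or.inr (Or.inl h)
        · exact absurd h.2 (by simp [pvHeadIs]; intro h2; omega)

-- on a strictly increasing list, pvTrip3 ↔ a 3-window by membership
theorem pv_trip3_iff (u : List Int) (hs : u.Pairwise (· < ·)) :
    pvTrip3 u = true ↔ ∃ r, r ∈ u ∧ (r + 1) ∈ u ∧ (r + 2) ∈ u := by
  induction u with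
  | nil => simp [pvTrip3]
  | cons a t iht =>
    have ht : t.Pairwise (· < ·) := hs.of_cons
    have halt : ∀ y ∈ t, a < y := fun y hy => List.rel_of_pairwise_cons hs hy
    constructor
    · intro htr
      cases t with
      | nil => simp [pvTrip3] at htr
      | cons b t' =>
        cases t' with
        | nil => simp [pvTrip3] at htr
        | cons c t'' =>
          simp only [pvTrip3, Bool.or_eq_true, Bool.and_eq_true, decide_eq_true_eq] at htr
          rcases htr with ⟨hb, hc⟩ | htr
          · exact ⟨a, by simp, by simp [hb.symm], by
              have : c = a + 2 := by omega
              simp [this.symm]⟩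
          · rcases (iht ht).mp htr with ⟨r, h1, h2, h3⟩
            exact ⟨r, List.mem_cons_of_mem a h1, List.mem_cons_of_mem a h2, List.mem_cons_of_mem a h3⟩
    · rintro ⟨r, h1, h2, h3⟩
      rcases List.mem_cons.mp h1 with rfl | hrt
      · -- r = a : a+1 and a+2 must be the next two elements
        have h2t : r + 1 ∈ t := by
          rcases List.mem_cons.mp h2 with h | h
          · omega
          · exact h
        have h3t : r + 2 ∈ t := by
          rcases List.mem_cons.mp h3 with h | h
          · omega
          · exact h
        cases t with
        | nil => simp at h2t
        | cons b t' =>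
          have hblt : ∀ y ∈ t', b < y := fun y hy => List.rel_of_pairwise_cons ht hy
          have hb : b = r + 1 := by
            rcases List.mem_cons.mp h2t with h | h
            · omega
            · have := hblt _ h; have := halt b (by simp); omega
          have h3t' : r + 2 ∈ t' := by
            rcases List.mem_cons.mp h3t with h | h
            · omega
            · exact h
          cases t' with
          | nil => simp at h3t'
          | cons c t'' =>
            have hclt : ∀ y ∈ t'', c < y := fun y hy =>
              List.rel_of_pairwise_cons ht.of_cons hy
            have hc : c = r + 2 := by
              rcases List.mem_cons.mp h3t' with h | h
              · omega
              · have := hclt _ h; have := hblt c (by simp); omega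
            simp only [pvTrip3, Bool.or_eq_true, Bool.and_eq_true, decide_eq_true_eq]
            exact Or.inl ⟨by omega, by omega⟩
      · -- r in the tail: r+1, r+2 also there (all > a)
        have h2t : r + 1 ∈ t := by
          rcases List.mem_cons.mp h2 with h | h
          · have := halt r hrt; omega
          · exact h
        have h3t : r + 2 ∈ t := by
          rcases List.mem_cons.mp h3 with h | h
          · have := halt r hrt; omega
          · exact h
        have htr : pvTrip3 t = true := (iht ht).mpr ⟨r, hrt, h2t, h3t⟩
        cases t with
        | nil => simp at hrt
        | cons b t' =>
          cases t' with
          | nil => simp [pvTrip3] at htr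
          | cons c t'' => simp only [pvTrip3, Bool.or_eq_true] at htr ⊢; tauto

theorem pv_trip3_short (u : List Int) (h : u.length < 3) : pvTrip3 u = false := by
  match u, h with
  | [], _ => rfl
  | [a], _ => rfl
  | [a, b], _ => rfl

-- A's body computes pvTrip3, for an arbitrary list
theorem pv_A_core (u : List Int) :
    (if u.length < 3 then false
     else
       decide (((PySem.List.pyRange 1 (u.length : Int) 1).foldl
        (fun (p : Int × Int) i =>
          if PySem.List.pyGetD u i 0 - PySem.List.pyGetD u (i - 1) 0 = 1 then
            (p.1 + 1, max p.2 (p.1 + 1))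
          else (1, p.2)) (1, 1)).2 ≥ 3))
    = pvTrip3 u := by
  by_cases hlen : u.length < 3
  · simp only [if_pos hlen]
    exact (pv_trip3_short u hlen).symm
  · simp only [if_neg hlen]
    have hb := pv_bridge u 1 (1, 1) (le_refl 1)
    rw [show ((1 : Nat) : Int) = (1 : Int) from rfl] at hb
    rw [hb]
    cases u with
    | nil => simp at hlen
    | cons a v =>
      simp only [show (1 - 1 : Nat) = 0 from rfl, List.getD, List.drop_one, List.tail_cons,
        List.getElem?_cons_zero, Option.getD_some]
      have hiff := pv_scan_spec v a 1 1 (le_refl 1)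
      cases hc : pvTrip3 (a :: v) with
      | false =>
        apply decide_eq_false
        rw [hiff]
        rintro (h | h | h)
        · omega
        · rw [hc] at h; exact Bool.false_ne_true h
        · exact absurd h.1 (by omega)
      | true =>
        apply decide_eq_true
        rw [hiff]
        exact Or.inr (Or.inl hc)

-- A computes pvTrip3 of sorted(set(ranks))
theorem pv_A_eq_trip3 (ranks : List Int) :
    board_has_straight_potential_py ranks
      = pvTrip3 (PySem.List.sorted (PySem.Set.ofList ranks) (fun x => x) false) := by
  unfold board_has_straight_potential_py
  exact pv_A_core _

-- B tests the 3-window by membership in set(ranks)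
theorem pv_B_iff (ranks : List Int) :
    board_has_straight_potential_py_alt ranks = true ↔
      ∃ r, r ∈ PySem.Set.ofList ranks ∧ (r + 1) ∈ PySem.Set.ofList ranks ∧ (r + 2) ∈ PySem.Set.ofList ranks := by
  unfold board_has_straight_potential_py_alt
  simp [List.any_eq_true, PySem.Set.contains]

-- ===== VERDICT (by name: the statement is the Claim_ definition above) =====
theorem board_has_straight_potential_py_spec : Claim_equal_board_has_straight_potential_py := by
  intro ranks _
  unfold Spec_board_has_straight_potential_py
  rw [pv_A_eq_trip3]
  set u := PySem.List.sorted (PySem.Set.ofList ranks) (fun x => x) false with hu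
  have hpw : u.Pairwise (· < ·) := PySem.List.sorted_ofList_pairwise_lt ranks
  have hmem : ∀ x : Int, x ∈ u ↔ x ∈ PySem.Set.ofList ranks := by
    intro x; rw [hu]; exact PySem.List.mem_sorted _ _ _ _
  cases hB : board_has_straight_potential_py_alt ranks with
  | false =>
    cases h : pvTrip3 u with
    | false => rfl
    | true =>
      exfalso
      rcases (pv_trip3_iff u hpw).mp h with ⟨r, h1, h2, h3⟩
      have : board_has_straight_potential_py_alt ranks = true :=
        (pv_B_iff ranks).mpr ⟨r, (hmem r).mp h1, (hmem _).mp h2, (hmem _).mp h3⟩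
      rw [hB] at this; exact Bool.false_ne_true this
  | true =>
    rcases (pv_B_iff ranks).mp hB with ⟨r, h1, h2, h3⟩
    exact (pv_trip3_iff u hpw).mpr ⟨r, (hmem r).mpr h1, (hmem _).mpr h2, (hmem _).mpr h3⟩
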